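-- pv_equiv track=rewrite | github.com/ro-berto/build | scripts/slave/recipes/run_presubmit.py | _limitSize
-- ===== SOURCE A (Python) =====
-- def _limitSize(message_list, char_limit=450):
--   """Returns a list of strings within a certain character length.
--
--   Args:
--      * message_list (List[str]) - The message to truncate as a list
--        of lines (without line endings).
--   """
--   hint = ('**The complete output can be'
--           ' found at the bottom of the presubmit stdout.**')
--   char_count = 0
--   for index, message in enumerate(message_list):
--     char_count += len(message)
--     if char_count > char_limit:
--       total_errors = len(message_list)
--       oversized_msg = (
--           '**Error size > %d chars, there are %d more error(s) (%d total)**'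
--       ) % (char_limit, total_errors - index, total_errors)
--       if index == 0:
--         # Show at minimum part of the first error message
--         first_message = message_list[index].replace('\n\n', '\n')
--         return ['\n\n'.join(_limitSize(first_message.splitlines()))]
--       return message_list[:index] + [oversized_msg, hint]
--   return message_list
-- ===== SOURCE B (Python) =====
-- def _limitSize(message_list, char_limit=450):
--   """Returns a list of strings within a certain character length."""
--   hint = ('**The complete output can be'
--           ' found at the bottom of the presubmit stdout.**')
--   # Precompute the table of running character totals.
--   prefix = []
--   total = 0
--   for message in message_list:
--     total += len(message)
--     prefix.append(total)
--   # Binary search: first index whose cumulative length exceeds char_limit.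
--   lo, hi = 0, len(prefix)
--   while lo < hi:
--     mid = (lo + hi) // 2
--     if prefix[mid] > char_limit:
--       hi = mid
--     else:
--       lo = mid + 1
--   index = lo
--   if index == len(message_list):
--     return message_list
--   if index == 0:
--     # Show at minimum part of the first error message
--     first_message = message_list[0].replace('\n\n', '\n')
--     return ['\n\n'.join(_limitSize(first_message.splitlines()))]
--   total_errors = len(message_list)
--   oversized_msg = (
--       '**Error size > %d chars, there are %d more error(s) (%d total)**'
--   ) % (char_limit, total_errors - index, total_errors)
--   return message_list[:index] + [oversized_msg, hint]
-- ===== Notes on version B (the rewrite author's own statement) =====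
-- stated objective: alternative
-- what changed: A's single accumulate-and-early-exit enumerate loop (which also builds the result inside the loop body) is replaced by first materialising the full prefix-sum table of message lengths and then locating the first index whose cumulative length exceeds char_limit with a hand-written binary search, after which the three result branches are taken outside any loop.
import Mathlib
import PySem

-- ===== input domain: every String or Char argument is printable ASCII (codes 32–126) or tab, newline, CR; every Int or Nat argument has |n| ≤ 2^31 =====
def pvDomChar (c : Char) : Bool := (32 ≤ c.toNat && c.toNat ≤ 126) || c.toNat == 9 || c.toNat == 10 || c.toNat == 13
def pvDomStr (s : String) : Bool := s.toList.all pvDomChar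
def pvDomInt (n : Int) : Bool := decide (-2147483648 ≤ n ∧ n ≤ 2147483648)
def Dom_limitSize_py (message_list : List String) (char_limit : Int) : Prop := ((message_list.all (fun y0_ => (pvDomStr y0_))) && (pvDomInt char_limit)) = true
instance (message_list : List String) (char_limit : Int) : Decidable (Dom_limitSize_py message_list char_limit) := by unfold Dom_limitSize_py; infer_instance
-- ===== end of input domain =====

-- B replaces A's single accumulate-and-early-exit scan by a precomputed prefix-sum table
-- plus a hand-written binary search for the crossing index (objective: alternative).
-- Python A raises RecursionError on inputs excluded by Pre_ (unbounded index-0 recursion);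
-- both ports bound that recursion by a fuel of 2, which suffices on every Pre_ input.


-- ===== PORT A =====
-- shared string literals of the Python source (identical text in A and B)
def pvHint : String :=
  "**The complete output can be found at the bottom of the presubmit stdout.**"

def pvOversized (char_limit : Int) (total_errors index : Nat) : String :=
  "**Error size > " ++ PySem.Int.toStr char_limit ++ " chars, there are " ++
    PySem.Int.toStr ((total_errors : Int) - (index : Int)) ++ " more error(s) (" ++
    PySem.Int.toStr (total_errors : Int) ++ " total)**"

/-- A's `for index, message in enumerate(message_list)` loop with running `char_count`;
    `recur` is the recursive `_limitSize` call of the `index == 0` branch. -/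
def limitSizeALoop (recur : List String → Int → List String)
    (message_list : List String) (char_limit : Int) :
    Nat → Int → List String → List String
  | _, _, [] => message_list
  | index, char_count, message :: rest =>
    let char_count' := char_count + PySem.Str.len message
    if char_count' > char_limit then
      let oversized_msg := pvOversized char_limit message_list.length index
      if index = 0 then
        -- message_list[index] is always in range here (index = 0, list nonempty): getD is exact
        let first_message := PySem.Str.replace (message_list.getD index "") "\n\n" "\n"
        [PySem.Str.join "\n\n" (recur (PySem.Str.splitlines first_message) 450)]
      else
        message_list.take index ++ [oversized_msg, pvHint]
    else limitSizeALoop recur message_list char_limit (index + 1) char_count' rest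

/-- Port of A: fuel bounds the index-0 recursion (Python raises RecursionError where
    more than the fuel would be needed; Pre_ admits only inputs needing depth ≤ 2). -/
def limitSizeA : Nat → List String → Int → List String
  | 0, _, _ => []
  | (f+1), message_list, char_limit =>
    limitSizeALoop (limitSizeA f) message_list char_limit 0 0 message_list

def limitSize_py (message_list : List String) (char_limit : Int) : List String :=
  limitSizeA 2 message_list char_limit

-- ===== PORT B =====
/-- B's hand-written binary search (the `while lo < hi` loop): first index in [lo, hi)
    with pref[idx] > key, else hi.  pref[mid] is always in range (mid < hi ≤ len),
    so getD is exact; `(lo + hi) / 2` on Nat is Python's `//` on nonnegative ints. -/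
def pvBisect (pref : List Int) (key : Int) (lo hi : Nat) : Nat :=
  if _h : lo < hi then
    if pref.getD ((lo + hi) / 2) 0 > key then pvBisect pref key lo ((lo + hi) / 2)
    else pvBisect pref key ((lo + hi) / 2 + 1) hi
  else lo
termination_by hi - lo
decreasing_by all_goals omega

/-- Port of B: prefix-sum table + binary search for the crossing index (same fuel as A). -/
def limitSizeB : Nat → List String → Int → List String
  | 0, _, _ => []
  | (f+1), message_list, char_limit =>
    let pref := (message_list.foldl
      (fun (acc : List Int × Int) message =>
        (acc.1 ++ [acc.2 + PySem.Str.len message], acc.2 + PySem.Str.len message))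
      ([], 0)).1
    let index := pvBisect pref char_limit 0 pref.length
    if index = message_list.length then
      message_list
    else if index = 0 then
      let first_message := PySem.Str.replace (message_list.getD 0 "") "\n\n" "\n"
      [PySem.Str.join "\n\n" (limitSizeB f (PySem.Str.splitlines first_message) 450)]
    else
      message_list.take index ++
        [pvOversized char_limit message_list.length index, pvHint]

def limitSize_py_alt (message_list : List String) (char_limit : Int) : List String :=
  limitSizeB 2 message_list char_limit

-- ===== PRECONDITION & SPEC =====
-- Pre_ excludes exactly the inputs on which Python A never returns (RecursionError): it
-- recurses on the first message's lines whenever that message alone exceeds char_limit,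
-- and diverges iff the first of those lines itself exceeds the default limit 450.
def Pre_limitSize_py (message_list : List String) (char_limit : Int) : Prop :=
  ∀ m ∈ message_list.take 1, PySem.Str.len m > char_limit →
    ∀ l ∈ (PySem.Str.splitlines (PySem.Str.replace m "\n\n" "\n")).take 1,
      PySem.Str.len l ≤ 450

instance (message_list : List String) (char_limit : Int) : Decidable (Pre_limitSize_py message_list char_limit) := by
  unfold Pre_limitSize_py; infer_instance

def pvWitness_limitSize_py : List String × Int := (["hello", "world"], 7)

def Spec_limitSize_py (message_list : List String) (char_limit : Int) (out : List String) : Prop := out = limitSize_py_alt message_list char_limit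
instance (message_list : List String) (char_limit : Int) (out : List String) : Decidable (Spec_limitSize_py message_list char_limit out) := by unfold Spec_limitSize_py; infer_instance

-- ===== CLAIM (what is proved, stated in full; the proofs are below) =====
def Claim_equal_limitSize_py : Prop := ∀ (message_list : List String) (char_limit : Int), Dom_limitSize_py message_list char_limit → Pre_limitSize_py message_list char_limit → Spec_limitSize_py message_list char_limit (limitSize_py message_list char_limit)

-- ===== LEMMAS AND PROOFS =====

/-- Running totals of string lengths starting from cc (the contents of B's prefix table). -/
def pvSum (cc : Int) : List String → List Int
  | [] => []
  | m :: r => (cc + PySem.Str.len m) :: pvSum (cc + PySem.Str.len m) r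

/-- Index of the first entry exceeding key, if any. -/
def pvFirstGT (key : Int) : List Int → Option Nat
  | [] => none
  | p :: r => if p > key then some 0 else (pvFirstGT key r).map (· + 1)

lemma pvSum_length (cc : Int) (ml : List String) : (pvSum cc ml).length = ml.length := by
  induction ml generalizing cc with
  | nil => rfl
  | cons m r ih => simp [pvSum, ih]

lemma pvFold_eq (ml : List String) : ∀ (acc : List Int) (cc : Int),
    (ml.foldl (fun (acc : List Int × Int) message =>
        (acc.1 ++ [acc.2 + PySem.Str.len message], acc.2 + PySem.Str.len message))
      (acc, cc)).1 = acc ++ pvSum cc ml := by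
  induction ml with
  | nil => simp [pvSum]
  | cons m r ih =>
    intro acc cc
    simp only [List.foldl_cons]
    rw [ih]
    simp [pvSum]

lemma pvStrLen_nonneg (m : String) : 0 ≤ PySem.Str.len m := by
  simp [PySem.Str.len]

lemma pvSum_ge (ml : List String) : ∀ (cc : Int) (i : Nat), i < ml.length →
    cc ≤ (pvSum cc ml).getD i 0 := by
  induction ml with
  | nil => intro cc i h; simp at h
  | cons m r ih =>
    intro cc i h
    cases i with
    | zero => simp [pvSum]
    | succ i =>
      have h1 : cc ≤ cc + PySem.Str.len m := by
        have := pvStrLen_nonneg m; omega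
      have h2 := ih (cc + PySem.Str.len m) i (by simpa using h)
      simp only [pvSum, List.getD_cons_succ]
      omega

lemma pvSum_mono (ml : List String) : ∀ (cc : Int) (i j : Nat), i ≤ j → j < ml.length →
    (pvSum cc ml).getD i 0 ≤ (pvSum cc ml).getD j 0 := by
  induction ml with
  | nil => intro cc i j _ h; simp at h
  | cons m r ih =>
    intro cc i j hij hj
    cases i with
    | zero =>
      cases j with
      | zero => exact le_rfl
      | succ j =>
        have := pvSum_ge r (cc + PySem.Str.len m) j (by simpa using hj)
        simpa [pvSum] using this
    | succ i =>
      cases j with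
      | zero => omega
      | succ j =>
        have := ih (cc + PySem.Str.len m) i j (by omega) (by simpa using hj)
        simpa [pvSum] using this

lemma pvFirstGT_some (key : Int) (P : List Int) : ∀ (c : Nat), pvFirstGT key P = some c →
    c < P.length ∧ key < P.getD c 0 ∧ ∀ i < c, P.getD i 0 ≤ key := by
  induction P with
  | nil => intro c h; simp [pvFirstGT] at h
  | cons p r ih =>
    intro c h
    by_cases hp : p > key
    · rw [pvFirstGT, if_pos hp] at h
      injection h with h0
      subst h0
      exact ⟨by simp, by simpa using hp, by omega⟩
    · rw [pvFirstGT, if_neg hp] at h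
      obtain ⟨c', hc', rfl⟩ := Option.map_eq_some_iff.mp h
      obtain ⟨h1, h2, h3⟩ := ih c' hc'
      refine ⟨by simpa using h1, by simpa using h2, ?_⟩
      intro i hi
      cases i with
      | zero => simpa using le_of_not_gt hp
      | succ i => simpa using h3 i (by omega)

lemma pvFirstGT_none (key : Int) (P : List Int) : pvFirstGT key P = none →
    ∀ i < P.length, P.getD i 0 ≤ key := by
  induction P with
  | nil => intro _ i h; simp at h
  | cons p r ih =>
    intro h i hi
    by_cases hp : p > key
    · rw [pvFirstGT, if_pos hp] at h; exact absurd h (by simp)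
    · rw [pvFirstGT, if_neg hp] at h
      cases i with
      | zero => simpa using le_of_not_gt hp
      | succ i =>
        have := ih (by simpa using h) i (by simpa using hi)
        simpa using this

lemma pvBisect_spec (P : List Int) (key : Int)
    (mono : ∀ i j : Nat, i ≤ j → j < P.length → P.getD i 0 ≤ P.getD j 0) :
    ∀ (n lo hi : Nat), hi - lo = n → lo ≤ hi → hi ≤ P.length →
    (∀ i < lo, P.getD i 0 ≤ key) → (∀ i, hi ≤ i → i < P.length → key < P.getD i 0) →
    (∀ i < pvBisect P key lo hi, P.getD i 0 ≤ key) ∧ pvBisect P key lo hi ≤ P.length ∧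
      (pvBisect P key lo hi < P.length → key < P.getD (pvBisect P key lo hi) 0) := by
  intro n
  induction n using Nat.strong_induction_on with
  | _ n IH =>
    intro lo hi hn hlohi hhi hlow hhigh
    by_cases h : lo < hi
    · rw [pvBisect, dif_pos h]
      have hmlt : (lo + hi) / 2 < hi := by omega
      have hml : lo ≤ (lo + hi) / 2 := by omega
      by_cases hc : P.getD ((lo + hi) / 2) 0 > key
      · rw [if_pos hc]
        exact IH ((lo + hi) / 2 - lo) (by omega) lo ((lo + hi) / 2) rfl (by omega)
          (by omega) hlow
          (fun i h1 h2 => lt_of_lt_of_le hc (mono ((lo + hi) / 2) i h1 h2))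
      · rw [if_neg hc]
        exact IH (hi - ((lo + hi) / 2 + 1)) (by omega) ((lo + hi) / 2 + 1) hi rfl (by omega)
          hhi
          (fun i h1 => le_trans (mono i ((lo + hi) / 2) (by omega) (by omega))
            (le_of_not_gt hc))
          hhigh
    · rw [pvBisect, dif_neg h]
      exact ⟨hlow, by omega, fun h1 => hhigh lo (by omega) h1⟩

/-- The binary search over the prefix table finds exactly the first crossing index. -/
lemma pvBisect_eq_firstGT (ml : List String) (key : Int) :
    pvBisect (pvSum 0 ml) key 0 (pvSum 0 ml).length =
      match pvFirstGT key (pvSum 0 ml) with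
      | none => ml.length
      | some c => c := by
  have mono : ∀ i j : Nat, i ≤ j → j < (pvSum 0 ml).length →
      (pvSum 0 ml).getD i 0 ≤ (pvSum 0 ml).getD j 0 := by
    intro i j hij hj
    exact pvSum_mono ml 0 i j hij (by simpa [pvSum_length] using hj)
  obtain ⟨h1, h2, h3⟩ := pvBisect_spec (pvSum 0 ml) key mono (pvSum 0 ml).length 0
    (pvSum 0 ml).length rfl (by omega) le_rfl (by omega) (by omega)
  cases hfg : pvFirstGT key (pvSum 0 ml) with
  | none =>
    have hall := pvFirstGT_none key (pvSum 0 ml) hfg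
    have hnl : ¬ pvBisect (pvSum 0 ml) key 0 (pvSum 0 ml).length < (pvSum 0 ml).length :=
      fun hlt => absurd (hall _ hlt) (not_le_of_gt (h3 hlt))
    simp only [pvSum_length] at hnl h2 ⊢
    omega
  | some c =>
    obtain ⟨g1, g2, g3⟩ := pvFirstGT_some key (pvSum 0 ml) c hfg
    rcases lt_trichotomy (pvBisect (pvSum 0 ml) key 0 (pvSum 0 ml).length) c with hlt | heq | hgt
    · exact absurd (g3 _ hlt) (not_le_of_gt (h3 (by omega)))
    · exact heq
    · exact absurd (h1 c hgt) (not_le_of_gt g2)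

/-- A's loop, characterized by the first crossing index of the running totals. -/
lemma limitSizeALoop_eq (recur : List String → Int → List String)
    (ml : List String) (cl : Int) :
    ∀ (rest : List String) (k : Nat) (cc : Int),
    limitSizeALoop recur ml cl k cc rest =
      match (pvFirstGT cl (pvSum cc rest)).map (· + k) with
      | none => ml
      | some c =>
        if c = 0 then
          [PySem.Str.join "\n\n" (recur
            (PySem.Str.splitlines (PySem.Str.replace (ml.getD 0 "") "\n\n" "\n")) 450)]
        else ml.take c ++ [pvOversized cl ml.length c, pvHint] := by
  intro rest
  induction rest with
  | nil => intro k cc; simp [limitSizeALoop, pvSum, pvFirstGT]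
  | cons m r ih =>
    intro k cc
    rw [limitSizeALoop]
    simp only [pvSum, pvFirstGT]
    by_cases hc : cc + PySem.Str.len m > cl
    · rw [if_pos hc, if_pos hc]
      simp only [Option.map_some]
      by_cases hk : k = 0
      · subst hk; simp
      · simp [hk]
    · rw [if_neg hc, if_neg hc]
      rw [ih (k + 1) (cc + PySem.Str.len m)]
      have hmm : ((pvFirstGT cl (pvSum (cc + PySem.Str.len m) r)).map (· + 1)).map (· + k) =
          (pvFirstGT cl (pvSum (cc + PySem.Str.len m) r)).map (· + (k + 1)) := by
        cases pvFirstGT cl (pvSum (cc + PySem.Str.len m) r) with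
        | none => rfl
        | some c => simp; omega
      rw [hmm]

/-- The two ports agree for every fuel and every input. -/
lemma limitSizeA_eq_B : ∀ (f : Nat) (ml : List String) (cl : Int),
    limitSizeA f ml cl = limitSizeB f ml cl := by
  intro f
  induction f with
  | zero => intro ml cl; rfl
  | succ f ih =>
    intro ml cl
    rw [limitSizeA, limitSizeB]
    simp only [pvFold_eq ml [] 0, List.nil_append, pvBisect_eq_firstGT ml cl]
    rw [limitSizeALoop_eq (limitSizeA f) ml cl ml 0 0]
    cases hfg : pvFirstGT cl (pvSum 0 ml) with
    | none => simp
    | some c =>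
      obtain ⟨g1, _, _⟩ := pvFirstGT_some cl (pvSum 0 ml) c hfg
      rw [pvSum_length] at g1
      have hne : ¬ c = ml.length := by omega
      by_cases hc : c = 0
      · subst hc
        simp [hne, ih]
      · simp [hne, hc]

-- ===== VERDICT (by name: the statement is the Claim_ definition above) =====
theorem limitSize_py_spec : Claim_equal_limitSize_py := by
  intro ml cl _ _
  show limitSize_py ml cl = limitSize_py_alt ml cl
  exact limitSizeA_eq_B 2 ml cl
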